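-- pv_equiv track=rewrite | github.com/shubh6-max/Stakeholder_360_v2.2 | pages/edit_profile.py | build_label_maps
-- ===== SOURCE A (Python) =====
-- from typing import Dict, Any, Optional, List, Tuple
--
-- def snake_to_label(name: str) -> str:
--     specials = {"id":"ID","csl":"CSL","url":"URL"}
--     parts = name.split("_")
--     titled = []
--     for i, p in enumerate(parts):
--         lp = p.lower()
--         if lp in specials:
--             titled.append(specials[lp])
--         else:
--             titled.append(p.capitalize())
--     label = " ".join(titled)
--     # curated tweaks
--     label = (label
--              .replace("Linkedin Url", "LinkedIn URL")
--              .replace("Business Unit", "Business Functions")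
--              .replace("Reporting Manager Designation", "Reporting Manager Title")
--              )
--     return label
--
-- def build_label_maps(cols: List[str]) -> Tuple[Dict[str, str], Dict[str, str]]:
--     col2label = {c: snake_to_label(c) for c in cols if c != "last_update_date"}
--     seen = {}
--     for c, lab in list(col2label.items()):
--         if lab in seen:
--             col2label[c] = f"{lab} ({c})"
--         seen[col2label[c]] = True
--     label2col = {v: k for k, v in col2label.items()}
--     return col2label, label2col
-- ===== SOURCE B (Python) =====
-- from typing import Dict, List, Tuple
--
-- def snake_to_label(name: str) -> str:
--     specials = {"id":"ID","csl":"CSL","url":"URL"}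
--     parts = name.split("_")
--     titled = []
--     for i, p in enumerate(parts):
--         lp = p.lower()
--         if lp in specials:
--             titled.append(specials[lp])
--         else:
--             titled.append(p.capitalize())
--     label = " ".join(titled)
--     label = (label
--              .replace("Linkedin Url", "LinkedIn URL")
--              .replace("Business Unit", "Business Functions")
--              .replace("Reporting Manager Designation", "Reporting Manager Title")
--              )
--     return label
--
-- def build_label_maps(cols: List[str]) -> Tuple[Dict[str, str], Dict[str, str]]:
--     # one pass: label2col itself detects duplicate labels; no seen set, no inversion pass
--     col2label: Dict[str, str] = {}
--     label2col: Dict[str, str] = {}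
--     for c in cols:
--         if c == "last_update_date" or c in col2label:
--             continue
--         lab = snake_to_label(c)
--         if lab in label2col:
--             lab = f"{lab} ({c})"
--         col2label[c] = lab
--         label2col[lab] = c
--     return col2label, label2col
-- ===== Notes on version B (the rewrite author's own statement) =====
-- stated objective: simpler
-- what changed: Replaces A's three-stage pipeline (comprehension build, separate dedup rescan with a seen set, reverse comprehension) by a single loop over cols that builds both dicts at once, using label2col itself as the duplicate-label detector; one traversal instead of three.
import Mathlib
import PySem

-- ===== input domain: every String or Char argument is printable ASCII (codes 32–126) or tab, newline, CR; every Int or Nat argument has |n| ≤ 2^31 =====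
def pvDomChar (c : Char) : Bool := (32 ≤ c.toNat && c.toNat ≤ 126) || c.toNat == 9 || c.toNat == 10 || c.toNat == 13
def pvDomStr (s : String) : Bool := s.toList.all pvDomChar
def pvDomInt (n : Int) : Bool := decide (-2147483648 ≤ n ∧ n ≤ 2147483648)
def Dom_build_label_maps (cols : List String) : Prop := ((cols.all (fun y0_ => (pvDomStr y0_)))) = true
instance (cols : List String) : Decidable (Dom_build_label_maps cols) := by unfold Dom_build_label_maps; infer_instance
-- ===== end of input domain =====

-- B replaces A's three-stage pipeline (comprehension build, dedup rescan with a `seen`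
-- set, reverse comprehension) by ONE loop over `cols` building both dicts at once,
-- using `label2col` itself as the duplicate-label detector (objective: simpler).

-- ===== PORT A =====
-- shared helper (identical in Source A and Source B): hand port of str.capitalize, exact on the ASCII domain
def pyCapitalize (s : String) : String :=
  match s.toList with
  | [] => ""
  | c :: rest => String.ofList (PySem.Chars.upperChar c :: rest.map PySem.Chars.lowerChar)

def snake_to_label (name : String) : String :=
  let specials : PySem.Dict String String := PySem.Dict.ofList [("id", "ID"), ("csl", "CSL"), ("url", "URL")]
  let parts := (PySem.Str.split? name "_").getD []   -- sep "_" ≠ "" so split? is never none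
  let titled := (PySem.List.enumerate parts).foldl (fun acc ip =>
    let p := ip.2
    let lp := PySem.Str.lower p
    if specials.contains lp then acc ++ [specials.getD lp ""]
    else acc ++ [pyCapitalize p]) []
  let label := PySem.Str.join " " titled
  PySem.Str.replace (PySem.Str.replace (PySem.Str.replace label
    "Linkedin Url" "LinkedIn URL")
    "Business Unit" "Business Functions")
    "Reporting Manager Designation" "Reporting Manager Title"

-- A stage-2 loop body: for c, lab in list(col2label.items()): …
def aStep (st : PySem.Dict String String × PySem.Dict String Bool) (p : String × String) :
    PySem.Dict String String × PySem.Dict String Bool :=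
  let c := p.1
  let lab := p.2
  let col2label := if st.2.contains lab then st.1.insert c (lab ++ " (" ++ c ++ ")") else st.1
  -- seen[col2label[c]] = True: c is always a key of col2label here, so getD with "" is exact
  (col2label, st.2.insert (col2label.getD c "") true)

def build_label_maps (cols : List String) : (List (String × String)) × (List (String × String)) :=
  let col2label : PySem.Dict String String :=
    cols.foldl (fun d c => if c ≠ "last_update_date" then d.insert c (snake_to_label c) else d)
      PySem.Dict.empty
  let st := col2label.items.foldl aStep (col2label, PySem.Dict.empty)
  let label2col := st.1.items.foldl (fun d p => d.insert p.2 p.1) PySem.Dict.empty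
  (st.1.items, label2col.items)

-- ===== PORT B =====
-- B loop body: skip last_update_date and already-seen columns, else insert into both dicts
def bStep (st : PySem.Dict String String × PySem.Dict String String) (c : String) :
    PySem.Dict String String × PySem.Dict String String :=
  if c = "last_update_date" ∨ st.1.contains c then st
  else
    let lab := snake_to_label c
    let lab := if st.2.contains lab then lab ++ " (" ++ c ++ ")" else lab
    (st.1.insert c lab, st.2.insert lab c)

def build_label_maps_alt (cols : List String) : (List (String × String)) × (List (String × String)) :=
  let st := cols.foldl bStep (PySem.Dict.empty, PySem.Dict.empty)
  (st.1.items, st.2.items)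

-- ===== PRECONDITION & SPEC =====
def Spec_build_label_maps (cols : List String) (out : (List (String × String)) × (List (String × String))) : Prop := out = build_label_maps_alt cols
instance (cols : List String) (out : (List (String × String)) × (List (String × String))) : Decidable (Spec_build_label_maps cols out) := by unfold Spec_build_label_maps; infer_instance

-- ===== CLAIM (what is proved, stated in full; the proofs are below) =====
def Claim_equal_build_label_maps : Prop := ∀ (cols : List String), Dom_build_label_maps cols → Spec_build_label_maps cols (build_label_maps cols)

-- ===== LEMMAS AND PROOFS =====

-- the columns that survive both programs' filtering (no "last_update_date", no duplicates),
-- given the set `seen` of already-kept column names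
def ddKeys (seen : List String) : List String → List String
  | [] => []
  | c :: r => if c = "last_update_date" ∨ c ∈ seen then ddKeys seen r else c :: ddKeys (c :: seen) r

def mapSnake (l : List String) : List (String × String) := l.map (fun c => (c, snake_to_label c))

-- reference one-pass recursion both ports are reduced to
def refGo (lc : PySem.Dict String String) : List (String × String) → List (String × String) × PySem.Dict String String
  | [] => ([], lc)
  | (c, lab) :: rest =>
    let lab' := if lc.contains lab then lab ++ " (" ++ c ++ ")" else lab
    let r := refGo (lc.insert lab' c) rest
    ((c, lab') :: r.1, r.2)

theorem ddKeys_not_mem_seen (cols : List String) (seen : List String) :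
    ∀ c ∈ ddKeys seen cols, c ∉ seen := by
  induction cols generalizing seen with
  | nil => simp [ddKeys]
  | cons c r ih =>
    intro x hx
    simp only [ddKeys] at hx
    split_ifs at hx with hc
    · exact ih seen x hx
    · rcases List.mem_cons.1 hx with h | h
      · subst h; tauto
      · have := ih (c :: seen) x h
        intro hmem; exact this (List.mem_cons_of_mem _ hmem)

theorem ddKeys_nodup (cols : List String) (seen : List String) : (ddKeys seen cols).Nodup := by
  induction cols generalizing seen with
  | nil => simp [ddKeys]
  | cons c r ih =>
    simp only [ddKeys]
    split_ifs with hc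
    · exact ih seen
    · refine List.nodup_cons.2 ⟨?_, ih (c :: seen)⟩
      intro hmem
      exact ddKeys_not_mem_seen r (c :: seen) c hmem (List.mem_cons_self)

-- Stage 1 of A: the dict comprehension builds exactly mapSnake (ddKeys seen cols)
theorem stage1_eq (cols : List String) (d : PySem.Dict String String) (seen : List String)
    (hval : ∀ p ∈ d.items, p.2 = snake_to_label p.1)
    (hnd : d.keys.Nodup)
    (hseen : ∀ x, x ∈ d.keys ↔ x ∈ seen) :
    (cols.foldl (fun d c => if c ≠ "last_update_date" then d.insert c (snake_to_label c) else d) d).items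
      = d.items ++ mapSnake (ddKeys seen cols) := by
  induction cols generalizing d seen with
  | nil => simp [ddKeys, mapSnake]
  | cons c r ih =>
    simp only [List.foldl_cons, ddKeys]
    by_cases hl : c = "last_update_date"
    · simp only [hl, ne_eq, not_true_eq_false, if_false]
      exact ih d seen hval hnd hseen
    · simp only [ne_eq, hl, not_false_eq_true, if_true]
      by_cases hs : c ∈ seen
      · -- c already a key: the insert overwrites with the same value, the dict is unchanged
        have hc : d.contains c = true := (PySem.Dict.contains_iff_mem_keys d c).2 ((hseen c).2 hs)
        have heq : d.insert c (snake_to_label c) = d := by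
          apply PySem.Dict.ext
          rw [PySem.Dict.items_insert_of_contains d (snake_to_label c) hc]
          rw [show d.items = List.map id d.items by simp]
          rw [List.map_map]
          apply List.map_congr_left
          intro p hp
          by_cases hpc : (p.1 == c) = true
          · have : p.1 = c := by simpa using hpc
            have : p = (c, snake_to_label c) := by
              rw [Prod.ext_iff]; exact ⟨this, by rw [hval p hp, this]⟩
            simp [← this]
          · simp only [Function.comp_apply, id_eq, if_neg hpc]
        rw [heq, if_pos (Or.inr hs)]
        exact ih d seen hval hnd hseen
      · -- fresh key: the insert appends
        have hc : d.contains c = false := by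
          by_contra h
          exact hs ((hseen c).1 ((PySem.Dict.contains_iff_mem_keys d c).1 (by simpa using h)))
        rw [if_neg (by tauto)]
        have hitems := PySem.Dict.items_insert_of_not_contains d (snake_to_label c) hc
        have hkeys := PySem.Dict.keys_insert_of_not_contains d (snake_to_label c) hc
        rw [ih (d.insert c (snake_to_label c)) (c :: seen)
          (by rw [hitems]; intro p hp
              rcases List.mem_append.1 hp with h | h
              · exact hval p h
              · simp at h; simp [h])
          (by rw [hkeys]
              refine List.Nodup.append hnd (List.nodup_singleton c) ?_
              intro x hx hx'
              simp at hx'; subst hx'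
              exact hs ((hseen x).1 hx))
          (by intro x; rw [hkeys]; simp [hseen x, or_comm])]
        rw [hitems]
        simp [mapSnake]

-- in-place overwrite of the key sitting at the border of done/rest
theorem insert_mid (done rest : List (String × String)) (c v lab : String)
    (h1 : c ∉ done.map Prod.fst) (h2 : c ∉ rest.map Prod.fst) :
    (PySem.Dict.mk (done ++ (c, lab) :: rest)).insert c v
      = PySem.Dict.mk (done ++ (c, v) :: rest) := by
  have hc : (PySem.Dict.mk (done ++ (c, lab) :: rest)).contains c = true := by
    simp [PySem.Dict.contains]
  apply PySem.Dict.ext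
  rw [PySem.Dict.items_insert_of_contains _ v hc]
  simp only [List.map_append, List.map_cons, beq_self_eq_true, if_true]
  congr 1
  · rw [show done = List.map id done by simp, List.map_map]
    apply List.map_congr_left
    intro p hp
    have : ¬(p.1 == c) = true := by
      simp only [beq_iff_eq]
      intro h; exact h1 (by rw [← h]; exact List.mem_map_of_mem hp)
    simp only [Function.comp_apply, id_eq, if_neg this]
  · congr 1
    rw [show rest = List.map id rest by simp, List.map_map]
    apply List.map_congr_left
    intro p hp
    have : ¬(p.1 == c) = true := by
      simp only [beq_iff_eq]
      intro h; exact h2 (by rw [← h]; exact List.mem_map_of_mem hp)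
    simp only [Function.comp_apply, id_eq, if_neg this]

theorem getD_mid (done rest : List (String × String)) (c v : String)
    (h1 : c ∉ done.map Prod.fst) :
    (PySem.Dict.mk (done ++ (c, v) :: rest)).getD c "" = v := by
  simp only [PySem.Dict.getD, PySem.Dict.get?, List.find?_append]
  have : done.find? (fun p => p.1 == c) = none := by
    rw [List.find?_eq_none]
    intro p hp
    simp only [beq_iff_eq]
    intro h; exact h1 (by rw [← h]; exact List.mem_map_of_mem hp)
  simp [this]

-- inserting the same key keeps seen = label2col with values replaced by `true`
theorem insert_map (seen : PySem.Dict String Bool) (lc : PySem.Dict String String) (k v : String)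
    (hseen : seen.items = lc.items.map (fun p => (p.1, true))) :
    (seen.insert k true).items = ((lc.insert k v).items.map (fun p => (p.1, true))) := by
  have hc : seen.contains k = lc.contains k := by
    simp [PySem.Dict.contains, hseen, List.any_map, Function.comp_def]
  by_cases h : lc.contains k = true
  · rw [PySem.Dict.items_insert_of_contains _ true (by rw [hc, h]),
        PySem.Dict.items_insert_of_contains _ v h]
    rw [hseen]
    simp only [List.map_map]
    apply List.map_congr_left
    intro p _
    by_cases hp : p.1 = k <;> simp [hp]
  · rw [PySem.Dict.items_insert_of_not_contains _ true (by rw [hc]; simpa using h),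
        PySem.Dict.items_insert_of_not_contains _ v (by simpa using h)]
    simp [hseen]

-- Stage 2 of A: in-place rename loop over the snapshot = refGo
theorem stage2_eq (ps : List (String × String)) (done : List (String × String))
    (lc : PySem.Dict String String) (seen : PySem.Dict String Bool)
    (hnd : ((done ++ ps).map Prod.fst).Nodup)
    (hseen : seen.items = lc.items.map (fun p => (p.1, true))) :
    ps.foldl aStep (PySem.Dict.mk (done ++ ps), seen)
      = (PySem.Dict.mk (done ++ (refGo lc ps).1),
         PySem.Dict.mk ((refGo lc ps).2.items.map (fun p => (p.1, true)))) := by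
  induction ps generalizing done lc seen with
  | nil =>
    simp only [List.foldl_nil, refGo]
    exact Prod.ext rfl (PySem.Dict.ext hseen)
  | cons p rest ih =>
    obtain ⟨c, lab⟩ := p
    have hnd2 := hnd
    simp only [List.map_append, List.map_cons, List.nodup_append, List.nodup_cons] at hnd2
    have h1 : c ∉ done.map Prod.fst := by intro h; have := hnd2.2.2; tauto
    have h2 : c ∉ rest.map Prod.fst := hnd2.2.1.1
    have hcont : seen.contains lab = lc.contains lab := by
      simp [PySem.Dict.contains, hseen, List.any_map, Function.comp_def]
    simp only [List.foldl_cons, aStep, refGo, hcont]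
    by_cases hlab : lc.contains lab = true
    · simp only [if_pos hlab]
      rw [insert_mid done rest c (lab ++ " (" ++ c ++ ")") lab h1 h2,
          getD_mid done rest c (lab ++ " (" ++ c ++ ")") h1]
      have := ih (done ++ [(c, lab ++ " (" ++ c ++ ")")]) (lc.insert (lab ++ " (" ++ c ++ ")") c)
        (seen.insert (lab ++ " (" ++ c ++ ")") true)
        (by simpa using hnd) (insert_map seen lc _ c hseen)
      simpa using this
    · simp only [if_neg hlab]
      rw [getD_mid done rest c lab h1]
      have := ih (done ++ [(c, lab)]) (lc.insert lab c) (seen.insert lab true)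
        (by simpa using hnd) (insert_map seen lc _ c hseen)
      simpa using this

-- Stage 3 of A: inverting the final col2label = the lc accumulated by refGo
theorem stage3_eq (ps : List (String × String)) (lc : PySem.Dict String String) :
    (refGo lc ps).1.foldl (fun d p => d.insert p.2 p.1) lc = (refGo lc ps).2 := by
  induction ps generalizing lc with
  | nil => rfl
  | cons p rest ih =>
    obtain ⟨c, lab⟩ := p
    simp only [refGo, List.foldl_cons]
    exact ih _

-- B's single loop = refGo over the filtered columns
theorem bfold_eq (cols : List String) (cl lc : PySem.Dict String String) (seen : List String)
    (hseen : ∀ c, cl.contains c = true ↔ c ∈ seen) :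
    cols.foldl bStep (cl, lc)
      = (PySem.Dict.mk (cl.items ++ (refGo lc (mapSnake (ddKeys seen cols))).1),
         (refGo lc (mapSnake (ddKeys seen cols))).2) := by
  induction cols generalizing cl lc seen with
  | nil =>
    simp only [List.foldl_nil, ddKeys, mapSnake, List.map_nil, refGo, List.append_nil]
  | cons c r ih =>
    simp only [List.foldl_cons, bStep, ddKeys]
    by_cases hl : c = "last_update_date"
    · rw [if_pos (Or.inl hl), if_pos (Or.inl hl)]
      exact ih cl lc seen hseen
    · by_cases hs : c ∈ seen
      · rw [if_pos (Or.inr ((hseen c).2 hs)), if_pos (Or.inr hs)]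
        exact ih cl lc seen hseen
      · have hc : cl.contains c = false := by
          by_contra h
          exact hs ((hseen c).1 (by simpa using h))
        rw [if_neg (show ¬(c = "last_update_date" ∨ cl.contains c = true) by rw [hc]; tauto),
            if_neg (show ¬(c = "last_update_date" ∨ c ∈ seen) by tauto)]
        simp only [mapSnake, List.map_cons, refGo]
        have hseen' : ∀ (lab' : String) (x : String),
            (cl.insert c lab').contains x = true ↔ x ∈ c :: seen := by
          intro lab' x
          rw [PySem.Dict.contains_insert]
          constructor
          · intro h
            rcases Bool.or_eq_true_iff.1 h with h | h
            · simp at h; simp [h]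
            · exact List.mem_cons_of_mem _ ((hseen x).1 h)
          · intro h
            rcases List.mem_cons.1 h with h | h
            · simp [h]
            · simp [(hseen x).2 h]
        by_cases hlc : lc.contains (snake_to_label c) = true
        · simp only [if_pos hlc]
          rw [ih (cl.insert c (snake_to_label c ++ " (" ++ c ++ ")"))
              (lc.insert (snake_to_label c ++ " (" ++ c ++ ")") c) (c :: seen) (hseen' _)]
          rw [PySem.Dict.items_insert_of_not_contains cl _ hc]
          simp [mapSnake]
        · simp only [if_neg hlc]
          rw [ih (cl.insert c (snake_to_label c)) (lc.insert (snake_to_label c) c) (c :: seen) (hseen' _)]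
          rw [PySem.Dict.items_insert_of_not_contains cl _ hc]
          simp [mapSnake]

-- ===== VERDICT (by name: the statement is the Claim_ definition above) =====
theorem build_label_maps_spec : Claim_equal_build_label_maps := by
  intro cols _
  unfold Spec_build_label_maps build_label_maps build_label_maps_alt
  have hmapfst : (mapSnake (ddKeys [] cols)).map Prod.fst = ddKeys [] cols := by
    simp [mapSnake, Function.comp_def]
  have hnd : ((([] : List (String × String)) ++ mapSnake (ddKeys [] cols)).map Prod.fst).Nodup := by
    simpa [hmapfst] using ddKeys_nodup cols []
  have h1 : (cols.foldl (fun d c => if c ≠ "last_update_date" then d.insert c (snake_to_label c) else d)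
        PySem.Dict.empty)
      = PySem.Dict.mk (([] : List (String × String)) ++ mapSnake (ddKeys [] cols)) := by
    apply PySem.Dict.ext
    simpa using stage1_eq cols PySem.Dict.empty []
      (by simp [PySem.Dict.empty]) (by simp [PySem.Dict.empty, PySem.Dict.keys])
      (by simp [PySem.Dict.empty, PySem.Dict.keys])
  have h2 := stage2_eq (mapSnake (ddKeys [] cols)) [] PySem.Dict.empty PySem.Dict.empty hnd
    (by simp [PySem.Dict.empty])
  have h3 := stage3_eq (mapSnake (ddKeys [] cols)) PySem.Dict.empty
  have hb := bfold_eq cols PySem.Dict.empty PySem.Dict.empty []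
    (by simp [PySem.Dict.empty, PySem.Dict.contains])
  simp only [List.nil_append] at h1 h2 hb
  rw [h1]
  simp only [PySem.Dict.items]
  rw [h2, hb]
  simp only [PySem.Dict.items]
  rw [h3]

  simp [PySem.Dict.empty]
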